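-- pv_equiv track=rewrite | github.com/nupsea/luminary | backend/app/services/entity_disambiguator.py | find_canonical
-- ===== SOURCE A (Python) =====
-- _HONORIFICS: frozenset[str] = frozenset(
--     {
--         "mr",
--         "mrs",
--         "ms",
--         "dr",
--         "sir",
--         "miss",
--         "lady",
--         "lord",
--         "prof",
--         "professor",
--         "rev",
--         "captain",
--         "capt",
--         "col",
--         "gen",
--         "sgt",
--         "lt",
--     }
-- )
--
-- def _strip_honorifics(name: str) -> str:
--     """Lowercase *name* and remove leading honorific tokens.
--
--     Trailing punctuation (period, comma) is stripped from each token before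
--     the honorific check.  Only tokens at the FRONT are removed.
--
--     Examples:
--         "Mr. Sherlock Holmes" -> "sherlock holmes"
--         "Dr. Watson"          -> "watson"
--         "Sr. Holmes"          -> "sr. holmes"  (sr not an honorific)
--         "Sherlock Holmes"     -> "sherlock holmes"
--     """
--     tokens = name.lower().strip().split()
--     while tokens:
--         stripped_first = tokens[0].rstrip(".,")
--         if stripped_first in _HONORIFICS:
--             tokens.pop(0)
--         else:
--             break
--     return " ".join(tokens)
--
-- def find_canonical(name: str, entity_type: str, existing_names: list[str]) -> str:
--     """Resolve *name* to a canonical form from *existing_names*.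
--
--     All comparisons are done in lowercase.  The function does NOT cross
--     entity_type boundaries — callers must pass only names of the same type.
--
--     Rules applied in order (first match wins):
--       A. Exact stripped match:  _strip(name) == _strip(existing)
--       B. Substring containment: one stripped form is a substring of the other;
--          the longer stripped form wins.
--       C. Token overlap >= 2:    at least two tokens shared; the longer
--          stripped form wins.
--
--     Special case for LIBRARY entities: version-qualified names with different
--     patch versions ('Python 3.11' vs 'Python 3.13') naturally stay separate
--     because Rules B and C require exact substring containment or >=2 shared tokens
--     respectively.  Version strings like '3.11' and '3.13' are not shared tokens.
--
--     Returns *name* unchanged if no rule matches.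
--     """
--     stripped_name = _strip_honorifics(name)
--
--     for existing in existing_names:
--         stripped_existing = _strip_honorifics(existing)
--
--         # Rule A — exact match after honorific stripping
--         if stripped_name == stripped_existing:
--             return existing
--
--     for existing in existing_names:
--         stripped_existing = _strip_honorifics(existing)
--
--         # Rule B — substring containment (longer wins)
--         if stripped_name and stripped_existing:
--             if stripped_name in stripped_existing or stripped_existing in stripped_name:
--                 # Return whichever (original form) corresponds to the longer stripped form
--                 if len(stripped_existing) >= len(stripped_name):
--                     return existing
--                 else:
--                     return name
--
--     for existing in existing_names:
--         stripped_existing = _strip_honorifics(existing)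
--
--         # Rule C — token overlap >= 2 (longer wins)
--         tokens_name = set(stripped_name.split())
--         tokens_existing = set(stripped_existing.split())
--         if len(tokens_name & tokens_existing) >= 2:
--             if len(stripped_existing) >= len(stripped_name):
--                 return existing
--             else:
--                 return name
--
--     # No match — this name becomes its own canonical entry
--     return name
-- ===== SOURCE B (Python) =====
-- _HONORIFICS = frozenset(
--     {"mr","mrs","ms","dr","sir","miss","lady","lord","prof","professor",
--      "rev","captain","capt","col","gen","sgt","lt"}
-- )
--
-- def _strip_honorifics(name):
--     tokens = name.lower().strip().split()
--     while tokens: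
--         stripped_first = tokens[0].rstrip(".,")
--         if stripped_first in _HONORIFICS:
--             tokens.pop(0)
--         else:
--             break
--     return " ".join(tokens)
--
-- def find_canonical(name, entity_type, existing_names):
--     stripped_name = _strip_honorifics(name)
--     rule_b = None
--     rule_c = None
--     for existing in existing_names:
--         stripped_existing = _strip_honorifics(existing)
--         if stripped_name == stripped_existing:
--             return existing  # Rule A outranks everything
--         longer = existing if len(stripped_existing) >= len(stripped_name) else name
--         if rule_b is None and stripped_name and stripped_existing and (
--             stripped_name in stripped_existing or stripped_existing in stripped_name
--         ):
--             rule_b = longer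
--         if rule_c is None and len(
--             set(stripped_name.split()) & set(stripped_existing.split())
--         ) >= 2:
--             rule_c = longer
--     if rule_b is not None:
--         return rule_b
--     if rule_c is not None:
--         return rule_c
--     return name
-- ===== Notes on version B (the rewrite author's own statement) =====
-- stated objective: alternative
-- what changed: Replaced A's three sequential scans (Rule A, then B, then C), each re-stripping honorifics per name, with a single pass that strips each existing name once, returns eagerly on a Rule-A match and records only the first Rule-B and first Rule-C candidates, picked in priority order after the loop.
import Mathlib
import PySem

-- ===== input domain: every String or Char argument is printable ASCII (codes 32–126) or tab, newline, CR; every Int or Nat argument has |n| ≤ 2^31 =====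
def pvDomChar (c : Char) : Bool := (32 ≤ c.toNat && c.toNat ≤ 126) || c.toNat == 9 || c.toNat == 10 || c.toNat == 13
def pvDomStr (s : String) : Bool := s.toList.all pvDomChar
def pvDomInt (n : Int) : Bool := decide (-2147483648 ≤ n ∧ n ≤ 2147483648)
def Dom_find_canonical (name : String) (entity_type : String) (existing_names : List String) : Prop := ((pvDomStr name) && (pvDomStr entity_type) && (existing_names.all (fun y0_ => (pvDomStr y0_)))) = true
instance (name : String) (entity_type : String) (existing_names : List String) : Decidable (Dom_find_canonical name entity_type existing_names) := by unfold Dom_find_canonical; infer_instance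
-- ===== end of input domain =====

-- B replaces A's three scans over existing_names with ONE pass that strips each name once,
-- returns eagerly on a Rule-A match and records the first Rule-B / Rule-C results (objective: alternative decomposition).

-- ===== PORT A =====
-- shared helper: the module's _HONORIFICS frozenset (as a list of distinct char-lists)
def pvHonorifics : List (List Char) :=
  ["mr".toList, "mrs".toList, "ms".toList, "dr".toList, "sir".toList, "miss".toList,
   "lady".toList, "lord".toList, "prof".toList, "professor".toList, "rev".toList,
   "captain".toList, "capt".toList, "col".toList, "gen".toList, "sgt".toList, "lt".toList]

-- token.rstrip(".,") — hand port (PySem has no rstrip-with-chars); exact: drops trailing '.'/',' chars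
def pvRstripPunct (t : List Char) : List Char :=
  (t.reverse.dropWhile (fun c => c == '.' || c == ',')).reverse

-- the while-loop of _strip_honorifics: pop leading honorific tokens
def pvDropHon : List (List Char) → List (List Char)
  | [] => []
  | t :: ts => if pvRstripPunct t ∈ pvHonorifics then pvDropHon ts else t :: ts

-- _strip_honorifics(name): lower, strip, split, drop leading honorifics, join with " "
def pvStripHon (s : String) : List Char :=
  PySem.Chars.join " ".toList (pvDropHon (PySem.Chars.split₀ (PySem.Chars.strip (PySem.Chars.lower s.toList))))

-- first pass of A: Rule A
def pvRuleA (sn : List Char) : List String → Option String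
  | [] => none
  | e :: es =>
      if sn = pvStripHon e then some e else pvRuleA sn es

-- second pass of A: Rule B
def pvRuleB (sn : List Char) (name : String) : List String → Option String
  | [] => none
  | e :: es =>
      let se := pvStripHon e
      if sn ≠ [] ∧ se ≠ [] then
        if PySem.Chars.isIn sn se || PySem.Chars.isIn se sn then
          some (if se.length ≥ sn.length then e else name)
        else pvRuleB sn name es
      else pvRuleB sn name es

-- third pass of A: Rule C
def pvRuleC (sn : List Char) (name : String) : List String → Option String
  | [] => none
  | e :: es =>
      let se := pvStripHon e
      let tn : PySem.Set (List Char) := PySem.Set.ofList (PySem.Chars.split₀ sn)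
      let te : PySem.Set (List Char) := PySem.Set.ofList (PySem.Chars.split₀ se)
      if PySem.Set.len (PySem.Set.inter tn te) ≥ 2 then
        some (if se.length ≥ sn.length then e else name)
      else pvRuleC sn name es

def find_canonical (name : String) (entity_type : String) (existing_names : List String) : String :=
  let sn := pvStripHon name
  match pvRuleA sn existing_names with
  | some e => e
  | none =>
    match pvRuleB sn name existing_names with
    | some v => v
    | none =>
      match pvRuleC sn name existing_names with
      | some v => v
      | none => name

-- ===== PORT B =====
-- single pass: return on Rule A, record first Rule-B and first Rule-C candidates
def pvAltLoop (sn : List Char) (name : String) (rb rc : Option String) : List String → String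
  | [] =>
      match rb with
      | some v => v
      | none => match rc with
                | some v => v
                | none => name
  | e :: es =>
      let se := pvStripHon e
      if sn = se then e
      else
        let longer := if se.length ≥ sn.length then e else name
        let rb' := if rb.isNone &&
            (!sn.isEmpty && !se.isEmpty &&
              (PySem.Chars.isIn sn se || PySem.Chars.isIn se sn)) then some longer else rb
        let rc' := if rc.isNone &&
            (PySem.Set.len (PySem.Set.inter
                (PySem.Set.ofList (PySem.Chars.split₀ sn))
                (PySem.Set.ofList (PySem.Chars.split₀ se))) ≥ 2) then some longer else rc
        pvAltLoop sn name rb' rc' es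

def find_canonical_alt (name : String) (entity_type : String) (existing_names : List String) : String :=
  pvAltLoop (pvStripHon name) name none none existing_names

-- ===== PRECONDITION & SPEC =====
def Spec_find_canonical (name : String) (entity_type : String) (existing_names : List String) (out : String) : Prop := out = find_canonical_alt name entity_type existing_names
instance (name : String) (entity_type : String) (existing_names : List String) (out : String) : Decidable (Spec_find_canonical name entity_type existing_names out) := by unfold Spec_find_canonical; infer_instance

-- ===== CLAIM (what is proved, stated in full; the proofs are below) =====
def Claim_equal_find_canonical : Prop := ∀ (name : String) (entity_type : String) (existing_names : List String), Dom_find_canonical name entity_type existing_names → Spec_find_canonical name entity_type existing_names (find_canonical name entity_type existing_names)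

-- ===== LEMMAS AND PROOFS =====

-- the loop invariant: B's single pass computes A's three-pass result, the accumulators
-- standing for "B/C result already found on the prefix"
theorem pvAltLoop_eq (sn : List Char) (name : String) (es : List String) :
    ∀ (rb rc : Option String),
    pvAltLoop sn name rb rc es =
      match pvRuleA sn es with
      | some e => e
      | none =>
        match rb.orElse (fun _ => pvRuleB sn name es) with
        | some v => v
        | none =>
          match rc.orElse (fun _ => pvRuleC sn name es) with
          | some v => v
          | none => name := by
  induction es with
  | nil =>
      intro rb rc
      cases rb <;> cases rc <;> simp [pvAltLoop, pvRuleA, pvRuleB, pvRuleC, Option.orElse]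
  | cons e es ih =>
      intro rb rc
      simp only [pvAltLoop]
      by_cases hA : sn = pvStripHon e
      · simp [pvRuleA, hA]
      · rw [if_neg hA, ih]
        simp only [pvRuleA]
        rw [if_neg hA]
        have hB2 : pvRuleB sn name (e :: es) =
            if (!sn.isEmpty && !(pvStripHon e).isEmpty &&
                (PySem.Chars.isIn sn (pvStripHon e) || PySem.Chars.isIn (pvStripHon e) sn)) then
              some (if (pvStripHon e).length ≥ sn.length then e else name)
            else pvRuleB sn name es := by
          simp only [pvRuleB]
          by_cases h1 : sn = []
          · simp [h1]
          · by_cases h2 : pvStripHon e = []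
            · simp [h1, h2]
            · by_cases h3 : (PySem.Chars.isIn sn (pvStripHon e) ||
                  PySem.Chars.isIn (pvStripHon e) sn) = true
              · simp [h1, h2, h3, List.isEmpty_iff]
              · simp [h1, h2, h3, List.isEmpty_iff]
        have hC2 : pvRuleC sn name (e :: es) =
            if (decide (PySem.Set.len (PySem.Set.inter
                (PySem.Set.ofList (PySem.Chars.split₀ sn))
                (PySem.Set.ofList (PySem.Chars.split₀ (pvStripHon e)))) ≥ 2)) then
              some (if (pvStripHon e).length ≥ sn.length then e else name)
            else pvRuleC sn name es := by
          simp only [pvRuleC]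
          by_cases h : PySem.Set.len (PySem.Set.inter
              (PySem.Set.ofList (PySem.Chars.split₀ sn))
              (PySem.Set.ofList (PySem.Chars.split₀ (pvStripHon e)))) ≥ 2
          · simp [h]
          · simp [h]
        simp only [hB2, hC2]
        cases rb <;> cases rc <;>
          by_cases hb : (!sn.isEmpty && !(pvStripHon e).isEmpty &&
              (PySem.Chars.isIn sn (pvStripHon e) || PySem.Chars.isIn (pvStripHon e) sn)) = true <;>
          by_cases hc : 2 ≤ List.length (PySem.Set.inter
              (PySem.Set.ofList (PySem.Chars.split₀ sn))
              (PySem.Set.ofList (PySem.Chars.split₀ (pvStripHon e)))) <;>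
          simp [Option.orElse, hb, hc]

-- ===== VERDICT (by name: the statement is the Claim_ definition above) =====
theorem find_canonical_spec : Claim_equal_find_canonical := by
  intro name entity_type existing_names _h
  unfold Spec_find_canonical find_canonical find_canonical_alt
  rw [pvAltLoop_eq]
  simp only [Option.orElse]
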